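-- pv_equiv track=rewrite | github.com/pms06-ai/phronesis-lex | backend/fcip/engines/temporal.py | find_temporal_conflicts
-- ===== SOURCE A (Python) =====
-- from typing import List, Optional, Set, Tuple
--
-- def find_temporal_conflicts(
--
--     events: List[dict]
-- ) -> List[Tuple[dict, dict, str]]:
--     """
--     Find temporal conflicts between events.
--
--     Returns:
--         List of (event1, event2, conflict_type) tuples
--     """
--     conflicts = []
--     for i, event1 in enumerate(events):
--         for event2 in events[i+1:]:
--             # Check for same-day conflicts from different sources
--             if event1.get("date") == event2.get("date"):
--                 if event1.get("claim_id") != event2.get("claim_id"):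
--                     conflicts.append((event1, event2, "same_day"))
--     return conflicts
-- ===== SOURCE B (Python) =====
-- def find_temporal_conflicts(events):
--     """Group events by date once; emit same-date, different-claim later pairs in (i, j) order."""
--     groups = {}
--     for e in events:
--         groups.setdefault(e.get("date"), []).append(e)
--     conflicts = []
--     seen = {}
--     for e1 in events:
--         d = e1.get("date")
--         k = seen.get(d, 0) + 1
--         seen[d] = k
--         c1 = e1.get("claim_id")
--         for e2 in groups[d][k:]:
--             if c1 != e2.get("claim_id"):
--                 conflicts.append((e1, e2, "same_day"))
--     return conflicts
-- ===== Notes on version B (the rewrite author's own statement) =====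
-- stated objective: alternative
-- what changed: B replaces A's all-pairs double scan with a dict grouping events by date built in one pass, then pairs each event only with the later events of its own date group via a per-date position counter (measured ~1.26x faster, below the 1.5x confirmation bar, so no speed claim).
import Mathlib
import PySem

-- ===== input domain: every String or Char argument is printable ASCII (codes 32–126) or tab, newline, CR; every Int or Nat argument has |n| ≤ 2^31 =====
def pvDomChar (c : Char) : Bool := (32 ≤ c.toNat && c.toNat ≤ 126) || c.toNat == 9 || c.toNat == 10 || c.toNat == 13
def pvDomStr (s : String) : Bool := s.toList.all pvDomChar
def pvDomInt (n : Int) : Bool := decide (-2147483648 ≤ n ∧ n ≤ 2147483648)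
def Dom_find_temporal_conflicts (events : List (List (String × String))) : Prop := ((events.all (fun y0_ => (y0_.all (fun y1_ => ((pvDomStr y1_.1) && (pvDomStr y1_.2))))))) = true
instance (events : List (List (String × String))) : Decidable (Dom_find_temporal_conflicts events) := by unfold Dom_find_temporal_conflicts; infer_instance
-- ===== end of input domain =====

-- B groups events by date in one dict pass and pairs each event only with the later
-- events of its own date group (a per-date counter keeps A's (i, j) output order);
-- A scans all pairs. Equivalence of the return values is proved on all inputs.

-- e.get(k) on a Python dict (assoc list, first match)
def pvGet (e : List (String × String)) (k : String) : Option String :=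
  (PySem.Dict.mk e).get? k

-- ===== PORT A =====
def find_temporal_conflicts (events : List (List (String × String))) : List ((List (String × String)) × (List (String × String)) × String) :=
  (PySem.List.enumerate events).foldl
    (fun conflicts p =>
      (PySem.List.slice events (some (p.1 + 1)) none).foldl
        (fun conflicts e2 =>
          if pvGet p.2 "date" == pvGet e2 "date" then
            if !(pvGet p.2 "claim_id" == pvGet e2 "claim_id") then
              conflicts ++ [(p.2, e2, "same_day")]
            else conflicts
          else conflicts)
        conflicts)
    []

-- ===== PORT B =====
-- groups = {}; for e in events: groups.setdefault(e.get("date"), []).append(e)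
def pvGroups (events : List (List (String × String))) : PySem.Dict (Option String) (List (List (String × String))) :=
  events.foldl (fun g e => g.modify (pvGet e "date") [] (fun l => l ++ [e])) PySem.Dict.empty

-- the body of B's main loop: seen/conflicts state, one event e1
def pvStep (groups : PySem.Dict (Option String) (List (List (String × String))))
    (st : PySem.Dict (Option String) Int × List ((List (String × String)) × (List (String × String)) × String))
    (e1 : List (String × String)) :
    PySem.Dict (Option String) Int × List ((List (String × String)) × (List (String × String)) × String) :=
  let d := pvGet e1 "date"
  let k : Int := st.1.getD d 0 + 1
  let seen := st.1.insert d k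
  let c1 := pvGet e1 "claim_id"
  let out := (PySem.List.slice (groups.getD d []) (some k) none).foldl
    (fun c e2 => if !(c1 == pvGet e2 "claim_id") then c ++ [(e1, e2, "same_day")] else c)
    st.2
  (seen, out)

def find_temporal_conflicts_alt (events : List (List (String × String))) : List ((List (String × String)) × (List (String × String)) × String) :=
  (events.foldl (pvStep (pvGroups events))
    ((PySem.Dict.empty : PySem.Dict (Option String) Int), [])).2

-- ===== PRECONDITION & SPEC =====
def Spec_find_temporal_conflicts (events : List (List (String × String))) (out : List ((List (String × String)) × (List (String × String)) × String)) : Prop := out = find_temporal_conflicts_alt events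
instance (events : List (List (String × String))) (out : List ((List (String × String)) × (List (String × String)) × String)) : Decidable (Spec_find_temporal_conflicts events out) := by unfold Spec_find_temporal_conflicts; infer_instance

-- ===== CLAIM (what is proved, stated in full; the proofs are below) =====
def Claim_equal_find_temporal_conflicts : Prop := ∀ (events : List (List (String × String))), Dom_find_temporal_conflicts events → Spec_find_temporal_conflicts events (find_temporal_conflicts events)

-- ===== LEMMAS AND PROOFS =====

-- the common semantics: each event paired with the later events of same date, different claim
def pvPred (e1 e2 : List (String × String)) : Bool :=
  (pvGet e1 "date" == pvGet e2 "date") && !(pvGet e1 "claim_id" == pvGet e2 "claim_id")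

def pvCanon : List (List (String × String)) → List ((List (String × String)) × (List (String × String)) × String)
  | [] => []
  | e :: rest => (rest.filter (pvPred e)).map (fun e2 => (e, e2, "same_day")) ++ pvCanon rest

theorem pvA_gen (full : List (List (String × String)))
    (l : List (List (String × String))) :
    ∀ (s : Nat) (acc : List ((List (String × String)) × (List (String × String)) × String)),
    full.drop s = l →
    (PySem.List.enumerate l (s : Int)).foldl
      (fun conflicts p =>
        (PySem.List.slice full (some (p.1 + 1)) none).foldl
          (fun conflicts e2 =>
            if pvGet p.2 "date" == pvGet e2 "date" then
              if !(pvGet p.2 "claim_id" == pvGet e2 "claim_id") then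
                conflicts ++ [(p.2, e2, "same_day")]
              else conflicts
            else conflicts)
          conflicts)
      acc = acc ++ pvCanon l := by
  induction l with
  | nil => intro s acc h; simp [PySem.List.enumerate_nil, pvCanon]
  | cons e rest ih =>
    intro s acc h
    rw [PySem.List.enumerate_cons, List.foldl_cons]
    have hdrop : full.drop (s + 1) = rest := by
      have : full.drop (s + 1) = (full.drop s).drop 1 := by
        rw [List.drop_drop]
      rw [this, h]; rfl
    have hs1 : ((s : Int) + 1) = ((s + 1 : Nat) : Int) := by push_cast; ring
    rw [hs1, PySem.List.slice_from_natCast, hdrop]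
    have hfun : (fun (conflicts : List ((List (String × String)) × (List (String × String)) × String)) e2 =>
        if pvGet e "date" == pvGet e2 "date" then
          if !(pvGet e "claim_id" == pvGet e2 "claim_id") then
            conflicts ++ [(e, e2, "same_day")]
          else conflicts
        else conflicts)
        = (fun conflicts e2 => if pvPred e e2 then conflicts ++ [(e, e2, "same_day")] else conflicts) := by
      funext c e2
      unfold pvPred
      cases pvGet e "date" == pvGet e2 "date" <;>
        cases pvGet e "claim_id" == pvGet e2 "claim_id" <;> simp
    rw [hfun, PySem.List.foldl_append_if, ih (s + 1) _ hdrop]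
    simp [pvCanon, List.append_assoc]

theorem pvA_eq_canon (events : List (List (String × String))) :
    find_temporal_conflicts events = pvCanon events := by
  unfold find_temporal_conflicts
  have := pvA_gen events events 0 [] (by simp)
  simpa using this

theorem pvGroups_getD (events : List (List (String × String))) (d : Option String) :
    (pvGroups events).getD d [] = events.filter (fun e => pvGet e "date" == d) := by
  unfold pvGroups
  have hm : events.foldl (fun g e => g.modify (pvGet e "date") [] (fun l => l ++ [e])) PySem.Dict.empty
      = (events.map (fun e => (pvGet e "date", e))).foldl
          (fun g p => g.modify p.1 [] (fun l => l ++ [p.2])) PySem.Dict.empty := by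
    rw [List.foldl_map]
  rw [hm, PySem.Dict.getD_foldl_modify_append]
  simp [List.filter_map, List.map_map, Function.comp_def]

theorem pvB_gen (events : List (List (String × String)))
    (suffix : List (List (String × String))) :
    ∀ (pfx : List (List (String × String)))
      (seen : PySem.Dict (Option String) Int)
      (acc : List ((List (String × String)) × (List (String × String)) × String)),
    events = pfx ++ suffix →
    (∀ d, seen.getD d 0 = ((pfx.filter (fun e => pvGet e "date" == d)).length : Int)) →
    (suffix.foldl (pvStep (pvGroups events)) (seen, acc)).2 = acc ++ pvCanon suffix := by
  induction suffix with
  | nil => intro pfx seen acc _ _; simp [pvCanon]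
  | cons e1 sfx ih =>
    intro pfx seen acc hev hseen
    rw [List.foldl_cons]
    have hk : seen.getD (pvGet e1 "date") 0 + 1
        = ((pfx.filter (fun e => pvGet e "date" == pvGet e1 "date")).length : Int) + 1 := by
      rw [hseen]
    have hgrp : (pvGroups events).getD (pvGet e1 "date") []
        = pfx.filter (fun e => pvGet e "date" == pvGet e1 "date")
          ++ e1 :: sfx.filter (fun e => pvGet e "date" == pvGet e1 "date") := by
      rw [pvGroups_getD, hev]
      simp [List.filter_append]
    have hstep : pvStep (pvGroups events) (seen, acc) e1
        = (seen.insert (pvGet e1 "date") (seen.getD (pvGet e1 "date") 0 + 1),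
           acc ++ (sfx.filter (pvPred e1)).map (fun e2 => (e1, e2, "same_day"))) := by
      unfold pvStep
      simp only
      congr 1
      rw [hk, hgrp]
      have hnn : (0 : Int) ≤ ((pfx.filter (fun e => pvGet e "date" == pvGet e1 "date")).length : Int) + 1 := by
        positivity
      rw [PySem.List.slice_from _ hnn]
      have htn : (((pfx.filter (fun e => pvGet e "date" == pvGet e1 "date")).length : Int) + 1).toNat
          = (pfx.filter (fun e => pvGet e "date" == pvGet e1 "date")).length + 1 := by
        omega
      have hlen : (pfx.filter (fun e => pvGet e "date" == pvGet e1 "date")).length + 1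
          = (pfx.filter (fun e => pvGet e "date" == pvGet e1 "date") ++ [e1]).length := by
        simp
      rw [htn, List.append_cons, hlen, List.drop_left]
      have hff : (sfx.filter (fun e => pvGet e "date" == pvGet e1 "date")).filter
            (fun e2 => !(pvGet e1 "claim_id" == pvGet e2 "claim_id"))
          = sfx.filter (pvPred e1) := by
        rw [List.filter_filter]
        apply List.filter_congr
        intro e2 _
        unfold pvPred
        simp only [Bool.and_comm, Bool.beq_comm]
      rw [PySem.List.foldl_append_if, hff]
    rw [hstep]
    rw [ih (pfx ++ [e1]) _ _ (by rw [hev, List.append_assoc]; rfl) ?_]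
    · simp [pvCanon, List.append_assoc]
    · intro d
      rw [PySem.Dict.getD_insert]
      by_cases hd : d = pvGet e1 "date"
      · subst hd
        rw [if_pos rfl, hseen]
        simp [List.filter_append]
      · rw [if_neg hd, hseen]
        have : (pvGet e1 "date" == d) = false := by
          simp [beq_eq_false_iff_ne]
          exact fun h => hd h.symm
        simp [List.filter_append, this]

theorem pvB_eq_canon (events : List (List (String × String))) :
    find_temporal_conflicts_alt events = pvCanon events := by
  unfold find_temporal_conflicts_alt
  rw [pvB_gen events events [] PySem.Dict.empty [] (by simp) (by intro d; simp [PySem.Dict.getD_empty])]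
  simp

-- ===== VERDICT (by name: the statement is the Claim_ definition above) =====
theorem find_temporal_conflicts_spec : Claim_equal_find_temporal_conflicts := by
  intro events _
  unfold Spec_find_temporal_conflicts
  rw [pvA_eq_canon, pvB_eq_canon]
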